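-- pv_equiv track=rewrite | github.com/sarah2233/translate | translate/convert/accesskey.py | combine
-- ===== SOURCE A (Python) =====
-- DEFAULT_ACCESSKEY_MARKER = "&"
--
-- def combine(label, accesskey, accesskey_marker=DEFAULT_ACCESSKEY_MARKER):
--     """
--     Create a combined string from separate label and access key.
--
--     Process:
--     1. Find the access key character in the label
--     2. Try exact case match first
--     3. Try alternate case if exact not found
--     4. Insert marker before the matched character
--     5. Handle special cases:
--        - XML entities
--        - Missing matches
--        - Empty strings
--
--     Args:
--         label: Text without access key (e.g., "File")
--         accesskey: Single character access key (e.g., "F")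
--         accesskey_marker: Character to mark the access key
--
--     Returns:
--         Combined string or None if combination impossible
--         Example: "&File" from ("File", "F")
--     """
--     assert isinstance(label, str)
--     assert isinstance(accesskey, str)
--
--     if len(accesskey) == 0:
--         return None
--
--     searchpos = 0
--     accesskeypos = -1
--     in_entity = False
--     accesskeyaltcasepos = -1
--
--     accesskey_alt_case = accesskey.lower() if accesskey.isupper() else accesskey.upper()
--
--     while (accesskeypos < 0) and searchpos < len(label):
--         searchchar = label[searchpos]
--         if searchchar == "&":
--             in_entity = True
--         elif searchchar in {";", " "}:
--             in_entity = False
--         if not in_entity: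
--             if searchchar == accesskey:  # Prefer supplied case
--                 accesskeypos = searchpos
--             elif searchchar == accesskey_alt_case:  # Other case otherwise
--                 if accesskeyaltcasepos == -1:
--                     # only want to remember first altcasepos
--                     accesskeyaltcasepos = searchpos
--                     # note: we keep on looping through in hope
--                     # of exact match
--         searchpos += 1
--
--     # if we didn't find an exact case match, use an alternate one if available
--     if accesskeypos == -1:
--         accesskeypos = accesskeyaltcasepos
--
--     # now we want to handle whatever we found...
--     if accesskeypos >= 0:
--         return label[:accesskeypos] + accesskey_marker + label[accesskeypos:]
--     # can't currently mix accesskey if it's not in label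
--     return None
-- ===== SOURCE B (Python) =====
-- DEFAULT_ACCESSKEY_MARKER = "&"
--
-- def combine(label, accesskey, accesskey_marker=DEFAULT_ACCESSKEY_MARKER):
--     """Two-phase version: build a (char, in_entity) table in one pass, then
--     pick the position with two generator searches (exact case, then alt case)."""
--     assert isinstance(label, str)
--     assert isinstance(accesskey, str)
--
--     if len(accesskey) == 0:
--         return None
--
--     accesskey_alt_case = accesskey.lower() if accesskey.isupper() else accesskey.upper()
--
--     table = []
--     in_entity = False
--     for ch in label:
--         if ch == "&":
--             in_entity = True
--         elif ch in {";", " "}: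
--             in_entity = False
--         table.append((ch, in_entity))
--
--     pos = next((i for i, (ch, ent) in enumerate(table) if not ent and ch == accesskey),
--                next((i for i, (ch, ent) in enumerate(table) if not ent and ch == accesskey_alt_case),
--                     None))
--     if pos is None:
--         return None
--     return label[:pos] + accesskey_marker + label[pos:]
-- ===== Notes on version B (the rewrite author's own statement) =====
-- stated objective: alternative
-- what changed: Replaced A's single interleaved early-exit scan (tracking accesskeypos/accesskeyaltcasepos sentinels while updating the entity flag) with a two-phase decomposition: one pass builds a (char, in_entity) table, then two separate searches pick the first exact-case index or else the first alternate-case index.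
import Mathlib
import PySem

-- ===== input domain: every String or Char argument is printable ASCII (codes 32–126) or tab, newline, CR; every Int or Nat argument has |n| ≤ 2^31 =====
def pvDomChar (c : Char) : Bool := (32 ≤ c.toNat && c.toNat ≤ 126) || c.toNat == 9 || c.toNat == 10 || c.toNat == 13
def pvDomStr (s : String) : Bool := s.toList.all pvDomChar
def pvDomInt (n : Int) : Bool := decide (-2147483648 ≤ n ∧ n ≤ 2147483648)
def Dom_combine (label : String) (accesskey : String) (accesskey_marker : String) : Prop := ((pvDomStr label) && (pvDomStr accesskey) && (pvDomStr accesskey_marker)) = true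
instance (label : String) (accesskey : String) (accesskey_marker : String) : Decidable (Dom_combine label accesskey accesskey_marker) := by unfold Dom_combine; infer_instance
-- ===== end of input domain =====

-- B builds a (char, in_entity) table in one pass and then picks the position with two
-- searches (exact case first, alternate case second) instead of A's single interleaved
-- early-exit scan; objective: alternative decomposition, same cost.

-- shared helpers (both Pythons compute these subexpressions identically)
-- str.isupper(): at least one cased char and no lowercase char; exact on the ASCII domain
def pyStrIsupper (cs : List Char) : Bool :=
  cs.any PySem.Chars.isupper && cs.all (fun c => !PySem.Chars.islower c)

-- accesskey.lower() if accesskey.isupper() else accesskey.upper()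
def altCase (accesskey : List Char) : List Char :=
  if pyStrIsupper accesskey then PySem.Chars.lower accesskey else PySem.Chars.upper accesskey

-- update of in_entity for one label character (done before the match tests, as in both Pythons)
def entStep (ent : Bool) (c : Char) : Bool :=
  if c = '&' then true else if c = ';' ∨ c = ' ' then false else ent

-- ===== PORT A =====
-- A's while loop; accesskeypos = -1 / accesskeyaltcasepos = -1 are rendered as `none`
def combineLoop (key alt : List Char) : List Char → Nat → Bool → Option Nat → Option Nat
  | [], _, _, altpos => altpos
  | c :: cs, pos, ent, altpos =>
    let ent' := entStep ent c
    if !ent' && ([c] == key) then some pos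
    else combineLoop key alt cs (pos + 1) ent'
      (if !ent' && ([c] == alt) && altpos == none then some pos else altpos)

-- label[:p] + marker + label[p:] with 0 ≤ p ≤ len(label): exactly take/drop
def combine (label : String) (accesskey : String) (accesskey_marker : String) : Option String :=
  if accesskey.toList.length = 0 then none
  else
    match combineLoop accesskey.toList (altCase accesskey.toList) label.toList 0 false none with
    | some p => some (String.ofList (label.toList.take p ++ accesskey_marker.toList ++ label.toList.drop p))
    | none => none

-- ===== PORT B =====
-- one pass recording (char, in_entity) for every label position
def buildTable : Bool → List Char → List (Char × Bool)
  | _, [] => []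
  | ent, c :: cs => let ent' := entStep ent c; (c, ent') :: buildTable ent' cs

def combine_alt (label : String) (accesskey : String) (accesskey_marker : String) : Option String :=
  if accesskey.toList.length = 0 then none
  else
    let alt := altCase accesskey.toList
    let table := buildTable false label.toList
    let pos := (table.findIdx? (fun p => !p.2 && ([p.1] == accesskey.toList))).orElse
               (fun _ => table.findIdx? (fun p => !p.2 && ([p.1] == alt)))
    match pos with
    | some p => some (String.ofList (label.toList.take p ++ accesskey_marker.toList ++ label.toList.drop p))
    | none => none

-- ===== PRECONDITION & SPEC =====
def Spec_combine (label : String) (accesskey : String) (accesskey_marker : String) (out : Option String) : Prop := out = combine_alt label accesskey accesskey_marker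
instance (label : String) (accesskey : String) (accesskey_marker : String) (out : Option String) : Decidable (Spec_combine label accesskey accesskey_marker out) := by unfold Spec_combine; infer_instance

-- ===== CLAIM (what is proved, stated in full; the proofs are below) =====
def Claim_equal_combine : Prop := ∀ (label : String) (accesskey : String) (accesskey_marker : String), Dom_combine label accesskey accesskey_marker → Spec_combine label accesskey accesskey_marker (combine label accesskey accesskey_marker)

-- ===== LEMMAS AND PROOFS =====

-- A's interleaved loop computes exactly B's "exact index, else remembered alt, else alt index":
lemma combineLoop_eq_table (key alt : List Char) (cs : List Char) :
    ∀ (pos : Nat) (ent : Bool) (altpos : Option Nat),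
    combineLoop key alt cs pos ent altpos =
      match (buildTable ent cs).findIdx? (fun p => !p.2 && ([p.1] == key)) with
      | some i => some (pos + i)
      | none =>
        match altpos with
        | some a => some a
        | none => ((buildTable ent cs).findIdx? (fun p => !p.2 && ([p.1] == alt))).map (pos + ·) := by
  induction cs with
  | nil => intro pos ent altpos; cases altpos <;> simp [combineLoop, buildTable]
  | cons c cs ih =>
    intro pos ent altpos
    simp only [combineLoop, buildTable, List.findIdx?_cons]
    by_cases hk : (!entStep ent c && ([c] == key)) = true
    · simp [hk]
    · simp only [hk, Bool.not_eq_true] at *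
      rw [ih]
      cases hfk : (buildTable (entStep ent c) cs).findIdx? (fun p => !p.2 && ([p.1] == key)) with
      | some i => simp; omega
      | none =>
        simp only [Option.map_none]
        cases altpos with
        | some a => simp
        | none =>
          by_cases ha : (!entStep ent c && ([c] == alt)) = true
          · simp [ha]
          · simp only [ha]
            cases hfa : (buildTable (entStep ent c) cs).findIdx? (fun p => !p.2 && ([p.1] == alt)) with
            | some j => simp; omega
            | none => simp

-- ===== VERDICT (by name: the statement is the Claim_ definition above) =====
theorem combine_spec : Claim_equal_combine := by
  intro label accesskey accesskey_marker _
  unfold Spec_combine combine combine_alt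
  by_cases h : accesskey.toList.length = 0
  · simp [h]
  · simp only [h, if_false]
    rw [combineLoop_eq_table]
    cases hfk : (buildTable false label.toList).findIdx? (fun p => !p.2 && ([p.1] == accesskey.toList)) with
    | some i => simp [Option.orElse]
    | none =>
      simp only [Option.orElse]
      cases hfa : (buildTable false label.toList).findIdx? (fun p => !p.2 && ([p.1] == altCase accesskey.toList)) with
      | some j => simp
      | none => simp
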